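-- pv_equiv track=rewrite | github.com/friscodanconia/TheRedPen | benchmark/parse_part2.py | is_author_line
-- ===== SOURCE A (Python) =====
-- def is_author_line(line):
--     stripped = line.strip()
--     if not stripped or len(stripped) > 40:
--         return False
--     # Must be 2-3 capitalized words with no punctuation
--     words = stripped.split()
--     if len(words) < 2 or len(words) > 4:
--         return False
--     if any(c in stripped for c in ".:;!?()[]{}#@0123456789"):
--         return False
--     if all(w[0].isupper() for w in words):
--         return True
--     return False
-- ===== SOURCE B (Python) =====
-- def is_author_line(line):
--     stripped = line.strip()
--     if not stripped or len(stripped) > 40: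
--         return False
--     forbidden = ".:;!?()[]{}#@0123456789"
--     words = 0
--     in_word = False
--     for c in stripped:
--         if c in forbidden:
--             return False
--         if c.isspace():
--             in_word = False
--         elif not in_word:
--             if not c.isupper():
--                 return False
--             words += 1
--             in_word = True
--     return 2 <= words <= 4
-- ===== Notes on version B (the rewrite author's own statement) =====
-- stated objective: alternative
-- what changed: Replaced the split()/any()/all() multi-pass pipeline with a single character scan over the stripped line that counts word starts, checks uppercase at each word start and rejects forbidden characters on the fly.
import Mathlib
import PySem

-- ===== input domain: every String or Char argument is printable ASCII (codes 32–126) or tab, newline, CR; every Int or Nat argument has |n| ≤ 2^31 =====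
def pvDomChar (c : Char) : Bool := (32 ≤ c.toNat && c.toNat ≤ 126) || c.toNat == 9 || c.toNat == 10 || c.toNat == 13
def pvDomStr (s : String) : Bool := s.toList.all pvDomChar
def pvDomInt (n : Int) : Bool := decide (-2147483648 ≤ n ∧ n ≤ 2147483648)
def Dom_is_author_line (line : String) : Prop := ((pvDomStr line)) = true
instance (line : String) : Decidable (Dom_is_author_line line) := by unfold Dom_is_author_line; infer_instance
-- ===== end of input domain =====

-- B replaces A's split()/any()/all() multi-pass pipeline by a single character scan
-- over the stripped line that counts word starts (objective: alternative).


-- ===== PORT A =====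
-- words produced by str.split() are nonempty, so Python's w[0] never raises;ic is ported as pyGet? with getD false
def is_author_line (line : String) : Bool :=
  let stripped := PySem.Chars.strip line.toList
  if stripped = [] || PySem.Chars.len stripped > 40 then false
  else
    let words := PySem.Chars.split₀ stripped
    if words.length < 2 || words.length > 4 then false
    else if (".:;!?()[]{}#@0123456789".toList).any (fun c => PySem.Chars.isIn [c] stripped) then false
    else if words.all (fun w => ((PySem.List.pyGet? w 0).map PySem.Chars.isupper).getD false) then true
    else false

-- ===== PORT B =====
-- the scan loop of Source B: none = early `return False`, some w = loop finished with w words counted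
def isAuthorAltLoop : List Char → Nat → Bool → Option Nat
  | [], words, _ => some words
  | c :: rest, words, inWord =>
    if (".:;!?()[]{}#@0123456789".toList).contains c then none
    else if PySem.Chars.isspace c then isAuthorAltLoop rest words false
    else if inWord then isAuthorAltLoop rest words true
    else if PySem.Chars.isupper c then isAuthorAltLoop rest (words + 1) true
    else none

def is_author_line_alt (line : String) : Bool :=
  let stripped := PySem.Chars.strip line.toList
  if stripped = [] || PySem.Chars.len stripped > 40 then false
  else
    match isAuthorAltLoop stripped 0 false with
    | none => false
    | some w => decide (2 ≤ w ∧ w ≤ 4)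

-- ===== PRECONDITION & SPEC =====
def Spec_is_author_line (line : String) (out : Bool) : Prop := out = is_author_line_alt line
instance (line : String) (out : Bool) : Decidable (Spec_is_author_line line out) := by unfold Spec_is_author_line; infer_instance

-- ===== CLAIM (what is proved, stated in full; the proofs are below) =====
def Claim_equal_is_author_line : Prop := ∀ (line : String), Dom_is_author_line line → Spec_is_author_line line (is_author_line line)

-- ===== LEMMAS AND PROOFS =====

def pvForb : List Char := ".:;!?()[]{}#@0123456789".toList
def pvBad (w : List Char) : Bool := !((PySem.List.pyGet? w 0).map PySem.Chars.isupper).getD false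

def pvSplit : List Char → List (List Char)
  | [] => []
  | c :: rest =>
    if PySem.Chars.isspace c then pvSplit rest
    else (c :: rest.takeWhile (fun d => !PySem.Chars.isspace d)) ::
         pvSplit (rest.dropWhile (fun d => !PySem.Chars.isspace d))
termination_by s => s.length
decreasing_by
  · simp
  · have := List.length_dropWhile_le (fun d => !PySem.Chars.isspace d) rest
    simp; omega

theorem pv_space_not_forb : ∀ c ∈ pvForb, PySem.Chars.isspace c = false := by
  have h : pvForb = ['.', ':', ';', '!', '?', '(', ')', '[', ']', '{', '}', '#', '@',
      '0', '1', '2', '3', '4', '5', '6', '7', '8', '9'] := by rfl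
  rw [h]
  intro c hc
  repeat (rcases List.mem_cons.mp hc with rfl | hc <;> try rfl)
  simp at hc

theorem pv_go_acc (s : List Char) : ∀ cur acc,
    PySem.Chars.split₀.go s cur acc = acc.reverse ++ PySem.Chars.split₀.go s cur [] := by
  induction s with
  | nil =>
    intro cur acc
    simp only [PySem.Chars.split₀.go]
    by_cases h : cur.isEmpty = true <;> simp [h]
  | cons c rest ih =>
    intro cur acc
    simp only [PySem.Chars.split₀.go]
    by_cases hs : PySem.Chars.isspace c = true
    · rw [if_pos hs, if_pos hs]
      by_cases hc : cur.isEmpty = true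
      · rw [if_pos hc, if_pos hc]; exact ih [] acc
      · rw [if_neg hc, if_neg hc]
        rw [ih [] (cur.reverse :: acc), ih [] [cur.reverse]]
        simp
    · rw [if_neg hs, if_neg hs]; exact ih _ acc

theorem pv_go_eq (s : List Char) : ∀ cur,
    PySem.Chars.split₀.go s cur [] =
      if cur.isEmpty then pvSplit s
      else (cur.reverse ++ s.takeWhile (fun d => !PySem.Chars.isspace d)) ::
           pvSplit (s.dropWhile (fun d => !PySem.Chars.isspace d)) := by
  induction s with
  | nil =>
    intro cur
    simp only [PySem.Chars.split₀.go]
    by_cases h : cur.isEmpty = true <;> simp [h, pvSplit]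
  | cons c rest ih =>
    intro cur
    simp only [PySem.Chars.split₀.go]
    by_cases hs : PySem.Chars.isspace c = true
    · rw [if_pos hs]
      by_cases hc : cur.isEmpty = true
      · rw [if_pos hc, ih []]
        simp [hc, pvSplit, hs]
      · rw [if_neg hc, pv_go_acc, ih []]
        simp [hc, pvSplit, hs]
    · rw [if_neg hs, ih (c :: cur)]
      have hsf : PySem.Chars.isspace c = false := by simpa using hs
      by_cases hc : cur.isEmpty = true
      · have hcur : cur = [] := by simpa using hc
        subst hcur
        simp [pvSplit, hsf]
      · simp [hc, hsf]

theorem pv_split₀_eq (s : List Char) : PySem.Chars.split₀ s = pvSplit s := by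
  unfold PySem.Chars.split₀
  simpa using pv_go_eq s []

theorem pv_forb_lit : ".:;!?()[]{}#@0123456789".toList = pvForb := rfl

theorem pv_forb_not_space (c : Char) (h : pvForb.contains c = true) :
    PySem.Chars.isspace c = false :=
  pv_space_not_forb c (by simpa using h)

theorem pv_singleton_infix {c : Char} {s : List Char} : [c] <:+: s ↔ c ∈ s := by
  constructor
  · intro h
    exact h.sublist.subset (List.mem_singleton_self c)
  · intro h
    obtain ⟨l1, l2, rfl⟩ := List.append_of_mem h
    exact ⟨l1, l2, by simp⟩

theorem pv_forb_any (s : List Char) :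
    pvForb.any (fun c => PySem.Chars.isIn [c] s) = s.any (fun c => pvForb.contains c) := by
  rw [Bool.eq_iff_iff]
  simp only [List.any_eq_true, PySem.Chars.isIn_iff_infix, pv_singleton_infix,
    List.contains_iff_mem]
  exact ⟨fun ⟨c, h1, h2⟩ => ⟨c, h2, h1⟩, fun ⟨c, h1, h2⟩ => ⟨c, h2, h1⟩⟩

theorem pv_altLoop_true (s : List Char) : ∀ w,
    isAuthorAltLoop s w true =
      if (s.takeWhile (fun d => !PySem.Chars.isspace d)).any (fun c => pvForb.contains c) then none
      else isAuthorAltLoop (s.dropWhile (fun d => !PySem.Chars.isspace d)) w false := by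
  induction s with
  | nil => intro w; simp [isAuthorAltLoop]
  | cons c rest ih =>
    intro w
    simp only [isAuthorAltLoop, pv_forb_lit]
    by_cases hf : pvForb.contains c = true
    · have hsf : PySem.Chars.isspace c = false := pv_forb_not_space c hf
      rw [if_pos hf]
      rw [List.takeWhile_cons_of_pos (by simp [hsf])]
      simp only [List.any_cons, hf, Bool.true_or]
      rw [if_pos (by simp)]
    · rw [if_neg hf]
      by_cases hs : PySem.Chars.isspace c = true
      · rw [if_pos hs]
        rw [List.takeWhile_cons_of_neg (by simp [hs]), List.dropWhile_cons_of_neg (by simp [hs])]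
        simp only [List.any_nil, if_neg (by simp : ¬(false = true))]
        simp only [isAuthorAltLoop, pv_forb_lit]
        rw [if_neg hf, if_pos hs]
      · rw [if_neg hs]
        rw [if_pos (by simp), ih w]
        rw [List.takeWhile_cons_of_pos (by simp [hs]), List.dropWhile_cons_of_pos (by simp [hs])]
        have hff : pvForb.contains c = false := by simpa using hf
        simp only [List.any_cons, hff, Bool.false_or]

theorem pv_altLoop_false : ∀ (n : Nat) (s : List Char), s.length ≤ n → ∀ w,
    isAuthorAltLoop s w false =
      if s.any (fun c => pvForb.contains c) || (pvSplit s).any pvBad then none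
      else some (w + (pvSplit s).length) := by
  intro n
  induction n with
  | zero =>
    intro s hs w
    have h0 : s = [] := List.length_eq_zero_iff.mp (Nat.le_zero.mp hs)
    subst h0
    simp [isAuthorAltLoop, pvSplit]
  | succ n ih =>
    intro s hs w
    match s with
    | [] => simp [isAuthorAltLoop, pvSplit]
    | c :: rest =>
      have hrest : rest.length ≤ n := by simpa using Nat.succ_le_succ_iff.mp hs
      simp only [isAuthorAltLoop, pv_forb_lit]
      by_cases hf : pvForb.contains c = true
      · rw [if_pos hf]
        simp only [List.any_cons, hf, Bool.true_or, Bool.true_or]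
        rw [if_pos (by simp)]
      · have hff : pvForb.contains c = false := by simpa using hf
        rw [if_neg hf]
        by_cases hsp : PySem.Chars.isspace c = true
        · rw [if_pos hsp, ih rest hrest w]
          have hsplit : pvSplit (c :: rest) = pvSplit rest := by simp [pvSplit, hsp]
          rw [hsplit]
          simp only [List.any_cons, hff, Bool.false_or]
        · rw [if_neg hsp, if_neg (by simp)]
          have hspf : PySem.Chars.isspace c = false := by simpa using hsp
          have hsplit : pvSplit (c :: rest) =
              (c :: rest.takeWhile (fun d => !PySem.Chars.isspace d)) ::
              pvSplit (rest.dropWhile (fun d => !PySem.Chars.isspace d)) := by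
            simp [pvSplit, hspf]
          rw [hsplit]
          have hany : rest.any (fun c => pvForb.contains c) =
              ((rest.takeWhile (fun d => !PySem.Chars.isspace d)).any (fun c => pvForb.contains c) ||
               (rest.dropWhile (fun d => !PySem.Chars.isspace d)).any (fun c => pvForb.contains c)) := by
            conv_lhs => rw [← List.takeWhile_append_dropWhile (p := fun d => !PySem.Chars.isspace d) (l := rest)]
            rw [List.any_append]
          by_cases hu : PySem.Chars.isupper c = true
          · rw [if_pos hu, pv_altLoop_true]
            have hdw : (rest.dropWhile (fun d => !PySem.Chars.isspace d)).length ≤ n := by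
              have := List.length_dropWhile_le (fun d => !PySem.Chars.isspace d) rest
              omega
            rw [ih _ hdw (w + 1)]
            have hbad : pvBad (c :: rest.takeWhile (fun d => !PySem.Chars.isspace d)) = false := by
              simp [pvBad, PySem.List.pyGet?, PySem.List.pyIdx?, hu]
            simp only [List.any_cons, hff, Bool.false_or, hany, hbad, List.length_cons]
            by_cases h1 : (rest.takeWhile (fun d => !PySem.Chars.isspace d)).any (fun c => pvForb.contains c) = true
            · rw [if_pos h1, if_pos (by simp only [h1, Bool.true_or])]
            · have f1 : (rest.takeWhile (fun d => !PySem.Chars.isspace d)).any (fun c => pvForb.contains c) = false := by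
                simpa using h1
              by_cases h2 : (rest.dropWhile (fun d => !PySem.Chars.isspace d)).any (fun c => pvForb.contains c) = true
              · rw [if_neg h1, if_pos (by simp only [h2, Bool.true_or]),
                    if_pos (by simp only [h2, Bool.or_true, Bool.true_or])]
              · have f2 : (rest.dropWhile (fun d => !PySem.Chars.isspace d)).any (fun c => pvForb.contains c) = false := by
                  simpa using h2
                by_cases h3 : (pvSplit (rest.dropWhile (fun d => !PySem.Chars.isspace d))).any pvBad = true
                · rw [if_neg h1, if_pos (by simp only [f2, Bool.false_or, h3]),
                      if_pos (by simp only [h3, Bool.or_true])]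
                · have f3 : (pvSplit (rest.dropWhile (fun d => !PySem.Chars.isspace d))).any pvBad = false := by
                    simpa using h3
                  rw [if_neg h1,
                      if_neg (by simp only [f2, f3, Bool.or_false]; exact Bool.false_ne_true),
                      if_neg (by simp only [f1, f2, f3, Bool.or_false]; exact Bool.false_ne_true)]
                  exact congrArg some (by omega)
          · rw [if_neg hu]
            have hbad : pvBad (c :: rest.takeWhile (fun d => !PySem.Chars.isspace d)) = true := by
              simp [pvBad, PySem.List.pyGet?, PySem.List.pyIdx?, hu]
            simp only [List.any_cons, hbad, Bool.true_or, Bool.or_true]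
            rw [if_pos (by simp)]

theorem is_author_line_spec' (line : String) : is_author_line line = is_author_line_alt line := by
  unfold is_author_line is_author_line_alt
  set stripped := PySem.Chars.strip line.toList with hstr
  by_cases hg : (decide (stripped = []) || decide (PySem.Chars.len stripped > 40)) = true
  · rw [if_pos hg, if_pos hg]
  · rw [if_neg hg, if_neg hg]
    rw [pv_altLoop_false stripped.length stripped le_rfl 0, pv_split₀_eq, pv_forb_lit, pv_forb_any]
    have hba : (pvSplit stripped).any pvBad
        = !(pvSplit stripped).all (fun w => ((PySem.List.pyGet? w 0).map PySem.Chars.isupper).getD false) := by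
      cases hx : (pvSplit stripped).all (fun w => ((PySem.List.pyGet? w 0).map PySem.Chars.isupper).getD false)
      · obtain ⟨w, hw, hbw⟩ := List.all_eq_false.mp hx
        simp only [Bool.not_false]
        exact List.any_eq_true.mpr ⟨w, hw, by simp [pvBad, hbw]⟩
      · simp only [Bool.not_true]
        refine List.any_eq_false.mpr fun w hw => ?_
        have := List.all_eq_true.mp hx w hw
        simp [pvBad, this]
    rw [hba]
    split_ifs with h1 h2 h3 <;> simp_all
    · intro _ _
      rcases h3 with h | h
      · obtain ⟨x, hx, hxf⟩ := h
        exact absurd hxf (h1 x hx)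
      · exact h
    · rw [Bool.eq_iff_iff]
      simp only [Bool.and_eq_true, Bool.not_eq_true', decide_eq_false_iff_not, decide_eq_true_eq]
      omega

-- ===== VERDICT (by name: the statement is the Claim_ definition above) =====
theorem is_author_line_spec : Claim_equal_is_author_line := by
  intro line _
  unfold Spec_is_author_line
  exact is_author_line_spec' line
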